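-- pv_equiv track=rewrite | github.com/mhrmm/testperanto-1 | testperanto/amr.py | cool_split
-- ===== SOURCE A (Python) =====
-- def cool_split(s):
--     lines = s.split('\n')
--     uncommented_lines = '\n'.join([line for line in lines if line[0] != '#'])
--     chunks = uncommented_lines.split()
--     for chunk in chunks:
--         next_token = ""
--         for char in chunk:
--             if char == "(" or char == ")":
--                 if len(next_token) > 0:
--                     yield next_token
--                     next_token = ""
--                 yield char
--             else:
--                 next_token += char
--         if len(next_token) > 0:
--             yield next_token
-- ===== SOURCE B (Python) =====
-- def cool_split(s):
--     # Same preprocessing, then an index-based scanner that emits each paren and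
--     # each maximal run of non-paren, non-space characters as a slice (no accumulator).
--     lines = s.split('\n')
--     text = '\n'.join(line for line in lines if line[0] != '#')
--     n = len(text)
--     i = 0
--     while i < n:
--         c = text[i]
--         if c == '(' or c == ')':
--             yield c
--             i += 1
--         elif c.isspace():
--             i += 1
--         else:
--             j = i + 1
--             while j < n and text[j] not in '()' and not text[j].isspace():
--                 j += 1
--             yield text[i:j]
--             i = j
-- ===== Notes on version B (the rewrite author's own statement) =====
-- stated objective: alternative
-- what changed: B keeps the preprocessing but replaces A's accumulator state machine over whitespace-split chunks with an index-based scanner that emits each parenthesis and each maximal run of non-paren non-space characters as a slice taken in one step (takeWhile-style), with no pending-token accumulator.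
import Mathlib
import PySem

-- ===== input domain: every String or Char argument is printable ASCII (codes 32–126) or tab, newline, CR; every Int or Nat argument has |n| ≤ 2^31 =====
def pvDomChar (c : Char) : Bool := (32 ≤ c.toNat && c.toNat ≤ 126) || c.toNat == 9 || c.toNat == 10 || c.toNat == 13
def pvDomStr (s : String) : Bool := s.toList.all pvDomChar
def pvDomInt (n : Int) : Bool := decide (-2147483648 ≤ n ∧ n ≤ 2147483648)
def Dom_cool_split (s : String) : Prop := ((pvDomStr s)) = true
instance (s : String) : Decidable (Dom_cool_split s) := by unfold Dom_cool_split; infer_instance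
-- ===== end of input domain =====

-- B keeps A's preprocessing but replaces the accumulator state machine over whitespace-split chunks with an index-based scanner emitting each paren and each maximal non-delimiter run in one takeWhile step (alternative, same cost); Pre_ excludes inputs with an empty line, where both raise IndexError.


-- ===== PORT A =====
-- inner loop of A over one whitespace-free chunk: state = (next_token, yielded tokens)
def csChunkGo : List Char → List Char → List String → List String
  | [], token, acc => if token = [] then acc else acc ++ [String.ofList token]
  | c :: rest, token, acc =>
    if c = '(' ∨ c = ')' then
      csChunkGo rest [] ((if token = [] then acc else acc ++ [String.ofList token]) ++ [String.ofList [c]])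
    else
      csChunkGo rest (token ++ [c]) acc

-- '\n' is nonempty, so s.split('\n') = Str.split? s "\n" is always `some`; getD [] is never taken
def cool_split (s : String) : List String :=
  let lines := (PySem.Str.split? s "\n").getD []
  let uncommented := PySem.Str.join "\n"
    (lines.filter (fun line => !(PySem.Str.pyGet? line 0 == some '#')))
  (PySem.Str.split₀ uncommented).foldl (fun acc chunk => csChunkGo chunk.toList [] acc) []

-- ===== PORT B =====
-- a delimiter ends a run: '(' , ')' or whitespace (B's inner `while` condition)
def csDelim (c : Char) : Bool := c = '(' || c = ')' || PySem.Chars.isspace c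

-- B's scanner: emit a paren, skip a space, or emit the maximal non-delimiter run in one step
def csTok : List Char → List String
  | [] => []
  | c :: rest =>
    if c = '(' ∨ c = ')' then String.ofList [c] :: csTok rest
    else if PySem.Chars.isspace c then csTok rest
    else String.ofList (c :: rest.takeWhile (fun d => !csDelim d))
           :: csTok (rest.dropWhile (fun d => !csDelim d))
termination_by cs => cs.length
decreasing_by
  · simp
  · simp
  · exact Nat.lt_succ_of_le (List.length_dropWhile_le ..)

def cool_split_alt (s : String) : List String :=
  let lines := (PySem.Str.split? s "\n").getD []
  let text := PySem.Str.join "\n"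
    (lines.filter (fun line => !(PySem.Str.pyGet? line 0 == some '#')))
  csTok text.toList

-- ===== PRECONDITION & SPEC =====
-- Pre_ excludes exactly the inputs containing an empty line (empty string, leading/trailing
-- '\n', or "\n\n"): there Python A (and B) raises IndexError on line[0].
def Pre_cool_split (s : String) : Prop :=
  s ≠ "" ∧ PySem.Str.isIn "\n\n" s = false ∧
  PySem.Str.startswith s "\n" = false ∧ PySem.Str.endswith s "\n" = false
instance (s : String) : Decidable (Pre_cool_split s) := by unfold Pre_cool_split; infer_instance
def pvWitness_cool_split : String := "(a / alpha :arg0 (b / beta))"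

def Spec_cool_split (s : String) (out : List String) : Prop := out = cool_split_alt s
instance (s : String) (out : List String) : Decidable (Spec_cool_split s out) := by unfold Spec_cool_split; infer_instance

-- ===== CLAIM (what is proved, stated in full; the proofs are below) =====
def Claim_equal_cool_split : Prop := ∀ (s : String), Dom_cool_split s → Pre_cool_split s → Spec_cool_split s (cool_split s)

-- ===== LEMMAS AND PROOFS =====

-- proof-only intermediate machine: A's chunk machine extended with whitespace flushes
def csLineGo : List Char → List Char → List String → List String
  | [], token, acc => if token = [] then acc else acc ++ [String.ofList token]
  | c :: rest, token, acc =>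
    if c = '(' ∨ c = ')' then
      csLineGo rest [] ((if token = [] then acc else acc ++ [String.ofList token]) ++ [String.ofList [c]])
    else if PySem.Chars.isspace c then
      csLineGo rest [] (if token = [] then acc else acc ++ [String.ofList token])
    else
      csLineGo rest (token ++ [c]) acc

-- on whitespace-free input the two machines coincide
theorem csLine_eq_csChunk (w : List Char) (h : ∀ c ∈ w, PySem.Chars.isspace c = false) :
    ∀ token acc, csLineGo w token acc = csChunkGo w token acc := by
  induction w with
  | nil => intro token acc; rfl
  | cons c rest ih =>
    intro token acc
    have hc : PySem.Chars.isspace c = false := h c (by simp)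
    have hrest : ∀ x ∈ rest, PySem.Chars.isspace x = false := fun x hx => h x (by simp [hx])
    by_cases hp : c = '(' ∨ c = ')'
    · simp [csLineGo, csChunkGo, hp, ih hrest]
    · simp [csLineGo, csChunkGo, hp, hc, ih hrest]

-- a whitespace-free prefix followed by a space: the line machine flushes exactly like the chunk machine
theorem csLine_word_space (w : List Char) (hw : ∀ c ∈ w, PySem.Chars.isspace c = false)
    (c : Char) (hc : PySem.Chars.isspace c = true) (hcp : ¬ (c = '(' ∨ c = ')')) :
    ∀ rest token acc, csLineGo (w ++ c :: rest) token acc = csLineGo rest [] (csChunkGo w token acc) := by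
  induction w with
  | nil =>
    intro rest token acc
    simp [csLineGo, csChunkGo, hcp, hc]
  | cons d w' ih =>
    intro rest token acc
    have hd : PySem.Chars.isspace d = false := hw d (by simp)
    have hw' : ∀ x ∈ w', PySem.Chars.isspace x = false := fun x hx => hw x (by simp [hx])
    by_cases hp : d = '(' ∨ d = ')'
    · simp [csLineGo, csChunkGo, hp, ih hw']
    · simp [csLineGo, csChunkGo, hp, hd, ih hw']

-- split₀.go: peel the accumulator off
theorem split0_go_acc (cs : List Char) : ∀ cur acc,
    PySem.Chars.split₀.go cs cur acc = acc.reverse ++ PySem.Chars.split₀.go cs cur [] := by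
  induction cs with
  | nil =>
    intro cur acc
    by_cases hcur : cur.isEmpty = true <;> simp [PySem.Chars.split₀.go, hcur]
  | cons c rest ih =>
    intro cur acc
    by_cases hs : PySem.Chars.isspace c = true
    · by_cases hcur : cur.isEmpty = true
      · rw [show PySem.Chars.split₀.go (c :: rest) cur acc = PySem.Chars.split₀.go rest [] acc from
              by simp [PySem.Chars.split₀.go, hs, hcur],
            show PySem.Chars.split₀.go (c :: rest) cur [] = PySem.Chars.split₀.go rest [] [] from
              by simp [PySem.Chars.split₀.go, hs, hcur]]
        exact ih [] acc
      · rw [show PySem.Chars.split₀.go (c :: rest) cur acc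
              = PySem.Chars.split₀.go rest [] (cur.reverse :: acc) from
              by simp [PySem.Chars.split₀.go, hs, hcur],
            show PySem.Chars.split₀.go (c :: rest) cur [] = PySem.Chars.split₀.go rest [] [cur.reverse] from
              by simp [PySem.Chars.split₀.go, hs, hcur],
            ih [] (cur.reverse :: acc), ih [] [cur.reverse]]
        simp
    · rw [show PySem.Chars.split₀.go (c :: rest) cur acc = PySem.Chars.split₀.go rest (c :: cur) acc from
            by simp [PySem.Chars.split₀.go, hs],
          show PySem.Chars.split₀.go (c :: rest) cur [] = PySem.Chars.split₀.go rest (c :: cur) [] from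
            by simp [PySem.Chars.split₀.go, hs]]
      exact ih _ _

-- the chunk-wise fold over split₀ equals one pass of the line machine
theorem split0_fold_eq_lineGo (cs : List Char) : ∀ cur tacc, (∀ c ∈ cur, PySem.Chars.isspace c = false) →
    (PySem.Chars.split₀.go cs cur []).foldl (fun acc w => csChunkGo w [] acc) tacc
      = csLineGo (cur.reverse ++ cs) [] tacc := by
  induction cs with
  | nil =>
    intro cur tacc hcur
    by_cases h : cur.isEmpty = true
    · have hc : cur = [] := List.isEmpty_iff.mp h
      subst hc
      simp [PySem.Chars.split₀.go, csLineGo]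
    · rw [show PySem.Chars.split₀.go [] cur [] = [cur.reverse] from
            by simp [PySem.Chars.split₀.go, h],
          List.append_nil]
      simp only [List.foldl_cons, List.foldl_nil]
      exact (csLine_eq_csChunk cur.reverse (by simpa using hcur) [] tacc).symm
  | cons c rest ih =>
    intro cur tacc hcur
    by_cases hs : PySem.Chars.isspace c = true
    · have hcp : ¬ (c = '(' ∨ c = ')') := by
        rcases Classical.em (c = '(' ∨ c = ')') with h | h
        · exfalso; rcases h with h | h <;> subst h <;> simp [PySem.Chars.isspace] at hs
        · exact h
      by_cases hcur0 : cur.isEmpty = true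
      · have hc : cur = [] := List.isEmpty_iff.mp hcur0
        subst hc
        rw [show PySem.Chars.split₀.go (c :: rest) [] [] = PySem.Chars.split₀.go rest [] [] from
              by simp [PySem.Chars.split₀.go, hs],
            ih [] tacc (by simp)]
        simp [csLineGo, hcp, hs]
      · rw [show PySem.Chars.split₀.go (c :: rest) cur [] = PySem.Chars.split₀.go rest [] [cur.reverse] from
              by simp [PySem.Chars.split₀.go, hs, hcur0],
            split0_go_acc rest [] [cur.reverse]]
        simp only [List.reverse_cons, List.reverse_nil, List.nil_append, List.foldl_append,
          List.foldl_cons, List.foldl_nil]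
        rw [ih [] _ (by simp),
            csLine_word_space cur.reverse (by simpa using hcur) c hs hcp]
        simp
    · rw [show PySem.Chars.split₀.go (c :: rest) cur [] = PySem.Chars.split₀.go rest (c :: cur) [] from
            by simp [PySem.Chars.split₀.go, hs],
          ih (c :: cur) tacc (by
            intro x hx
            rw [List.mem_cons] at hx
            rcases hx with rfl | hx
            · exact Bool.not_eq_true _ ▸ (by simpa using hs)
            · exact hcur x hx)]
      simp

theorem split0_fold (cs : List Char) (tacc : List String) :
    (PySem.Chars.split₀ cs).foldl (fun acc w => csChunkGo w [] acc) tacc = csLineGo cs [] tacc := by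
  simpa using split0_fold_eq_lineGo cs [] tacc (by simp)

-- appending past an all-true prefix commutes with takeWhile/dropWhile
theorem takeWhile_append_all {α : Type} {p : α → Bool} {l₁ l₂ : List α}
    (h : ∀ x ∈ l₁, p x = true) : (l₁ ++ l₂).takeWhile p = l₁ ++ l₂.takeWhile p := by
  rw [List.takeWhile_append, List.takeWhile_eq_self_iff.mpr h]
  simp

theorem dropWhile_append_all {α : Type} {p : α → Bool} {l₁ l₂ : List α}
    (h : ∀ x ∈ l₁, p x = true) : (l₁ ++ l₂).dropWhile p = l₂.dropWhile p := by
  rw [List.dropWhile_append, List.dropWhile_eq_nil_iff.mpr h]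
  simp

-- the line machine with a pending non-delimiter token computes acc ++ B's direct scan
theorem lineGo_eq_tok (cs : List Char) : ∀ token acc, (∀ c ∈ token, csDelim c = false) →
    csLineGo cs token acc = acc ++ csTok (token ++ cs) := by
  induction cs with
  | nil =>
    intro token acc htok
    cases token with
    | nil => simp [csLineGo, csTok]
    | cons t ts =>
      have ht : csDelim t = false := htok t (by simp)
      have hts : ∀ x ∈ ts, csDelim x = false := fun x hx => htok x (by simp [hx])
      have htp : ¬ (t = '(' ∨ t = ')') := by
        rcases Classical.em (t = '(' ∨ t = ')') with h | h
        · exfalso; rcases h with h | h <;> subst h <;> simp [csDelim] at ht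
        · exact h
      have hts2 : PySem.Chars.isspace t = false := by
        simp [csDelim] at ht; exact ht.2
      rw [show csLineGo [] (t :: ts) acc = acc ++ [String.ofList (t :: ts)] from by simp [csLineGo]]
      rw [show (t :: ts) ++ ([] : List Char) = t :: ts from by simp]
      rw [show csTok (t :: ts)
            = String.ofList (t :: ts.takeWhile (fun d => !csDelim d))
                :: csTok (ts.dropWhile (fun d => !csDelim d)) from by
            simp [csTok, htp, hts2]]
      rw [List.takeWhile_eq_self_iff.mpr (by intro x hx; simp [hts x hx]),
          List.dropWhile_eq_nil_iff.mpr (by intro x hx; simp [hts x hx])]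
      simp [csTok]
  | cons c rest ih =>
    intro token acc htok
    by_cases hp : c = '(' ∨ c = ')'
    · have hstep : csLineGo (c :: rest) token acc
          = csLineGo rest [] ((if token = [] then acc else acc ++ [String.ofList token]) ++ [String.ofList [c]]) := by
        simp [csLineGo, hp]
      rw [hstep, ih [] _ (by simp)]
      cases token with
      | nil => simp [csTok, hp]
      | cons t ts =>
        have ht : csDelim t = false := htok t (by simp)
        have hts : ∀ x ∈ ts, csDelim x = false := fun x hx => htok x (by simp [hx])
        have htp : ¬ (t = '(' ∨ t = ')') := by
          rcases Classical.em (t = '(' ∨ t = ')') with h | h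
          · exfalso; rcases h with h | h <;> subst h <;> simp [csDelim] at ht
          · exact h
        have hts2 : PySem.Chars.isspace t = false := by
          simp [csDelim] at ht; exact ht.2
        have hcd : csDelim c = true := by
          rcases hp with h | h <;> subst h <;> simp [csDelim]
        rw [show (t :: ts) ++ (c :: rest) = t :: (ts ++ c :: rest) from by simp]
        rw [show csTok (t :: (ts ++ c :: rest))
              = String.ofList (t :: (ts ++ c :: rest).takeWhile (fun d => !csDelim d))
                  :: csTok ((ts ++ c :: rest).dropWhile (fun d => !csDelim d)) from by
              simp [csTok, htp, hts2]]
        rw [takeWhile_append_all (by intro x hx; simp [hts x hx]) (l₂ := c :: rest),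
            dropWhile_append_all (by intro x hx; simp [hts x hx]) (l₂ := c :: rest)]
        rw [show (c :: rest).takeWhile (fun d => !csDelim d) = [] from by simp [List.takeWhile, hcd],
            show (c :: rest).dropWhile (fun d => !csDelim d) = c :: rest from by simp [List.dropWhile, hcd]]
        simp [csTok, hp]
    · by_cases hs : PySem.Chars.isspace c = true
      · have hstep : csLineGo (c :: rest) token acc
            = csLineGo rest [] (if token = [] then acc else acc ++ [String.ofList token]) := by
          simp [csLineGo, hp, hs]
        rw [hstep, ih [] _ (by simp)]
        cases token with
        | nil => simp [csTok, hp, hs]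
        | cons t ts =>
          have ht : csDelim t = false := htok t (by simp)
          have hts : ∀ x ∈ ts, csDelim x = false := fun x hx => htok x (by simp [hx])
          have htp : ¬ (t = '(' ∨ t = ')') := by
            rcases Classical.em (t = '(' ∨ t = ')') with h | h
            · exfalso; rcases h with h | h <;> subst h <;> simp [csDelim] at ht
            · exact h
          have hts2 : PySem.Chars.isspace t = false := by
            simp [csDelim] at ht; exact ht.2
          have hcd : csDelim c = true := by simp [csDelim, hs]
          rw [show (t :: ts) ++ (c :: rest) = t :: (ts ++ c :: rest) from by simp]
          rw [show csTok (t :: (ts ++ c :: rest))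
                = String.ofList (t :: (ts ++ c :: rest).takeWhile (fun d => !csDelim d))
                    :: csTok ((ts ++ c :: rest).dropWhile (fun d => !csDelim d)) from by
                simp [csTok, htp, hts2]]
          rw [takeWhile_append_all (by intro x hx; simp [hts x hx]) (l₂ := c :: rest),
              dropWhile_append_all (by intro x hx; simp [hts x hx]) (l₂ := c :: rest)]
          rw [show (c :: rest).takeWhile (fun d => !csDelim d) = [] from by simp [List.takeWhile, hcd],
              show (c :: rest).dropWhile (fun d => !csDelim d) = c :: rest from by simp [List.dropWhile, hcd]]
          simp [csTok, hp, hs]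
      · have hcd : csDelim c = false := by
          simp [csDelim, hs]
          constructor
          · intro h; exact hp (Or.inl h)
          · intro h; exact hp (Or.inr h)
        have hstep : csLineGo (c :: rest) token acc = csLineGo rest (token ++ [c]) acc := by
          simp [csLineGo, hp, hs]
        rw [hstep, ih (token ++ [c]) acc (by
              intro x hx
              rw [List.mem_append] at hx
              rcases hx with hx | hx
              · exact htok x hx
              · simp at hx; subst hx; exact hcd)]
        simp

theorem cool_split_spec : Claim_equal_cool_split := by
  intro s _ _
  unfold Spec_cool_split cool_split cool_split_alt
  rw [show ∀ l : List String, l.foldl (fun acc chunk => csChunkGo chunk.toList [] acc) ([] : List String)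
        = (l.map String.toList).foldl (fun acc w => csChunkGo w [] acc) [] from
        fun l => (List.foldl_map (f := String.toList) (g := fun acc w => csChunkGo w [] acc)).symm,
      PySem.Str.split₀_map_toList, split0_fold, lineGo_eq_tok _ [] [] (by simp)]
  simp
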